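-- pv_equiv track=rewrite | github.com/rombobamba01/juicy_max | lab4.py | getCodableX
-- ===== SOURCE A (Python) =====
-- X1max = 40
--
-- X1min = 10
--
-- X2max = 35
--
-- X2min = -15
--
-- X3max = 5
--
-- X3min = -15
--
-- def getCodableX(factorsArray):
--     x1, x2, x3 = [], [], []
--     for factorNumber in range(len(factorsArray)):
--         factor = factorsArray[factorNumber]
--         for i in factor:
--             if i > 0:
--                 if factorNumber == 0:
--                     x1.append(X1max)
--                 elif factorNumber == 1:
--                     x2.append(X2max)
--                 else:
--                     x3.append(X3max)
--             else:
--                 if factorNumber == 0: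
--                     x1.append(X1min)
--                 elif factorNumber == 1:
--                     x2.append(X2min)
--                 else:
--                     x3.append(X3min)
--     return x1, x2, x3
-- ===== SOURCE B (Python) =====
-- X1max = 40
-- X1min = 10
-- X2max = 35
-- X2min = -15
-- X3max = 5
-- X3min = -15
--
-- def _code(row, lo, hi):
--     # recursively code one row's signs with a shared (lo, hi) pair
--     if not row:
--         return []
--     return [hi if row[0] > 0 else lo] + _code(row[1:], lo, hi)
--
-- def _tail3(rows):
--     # recursively flatten-and-code all remaining rows with the X3 bounds
--     if not rows:
--         return []
--     return _code(rows[0], X3min, X3max) + _tail3(rows[1:])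
--
-- def getCodableX(factorsArray):
--     # structural recursion on the shape of factorsArray instead of an indexed loop
--     if not factorsArray:
--         return [], [], []
--     if len(factorsArray) == 1:
--         return _code(factorsArray[0], X1min, X1max), [], []
--     first, second, *rest = factorsArray
--     return (_code(first, X1min, X1max),
--             _code(second, X2min, X2max),
--             _tail3(rest))
-- ===== Notes on version B (the rewrite author's own statement) =====
-- stated objective: alternative
-- what changed: Replaces A's single index-dispatching nested loop (branching on factorNumber per element) with pattern matching on the list's shape and a shared bounds-parameterized recursive coder: _code(row, lo, hi) codes any row by structural recursion and _tail3 recursively flattens the remaining rows; no index arithmetic or per-element dispatch remains (B trades speed for this structure: its slicing recursion is quadratic per row in CPython).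
import Mathlib
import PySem

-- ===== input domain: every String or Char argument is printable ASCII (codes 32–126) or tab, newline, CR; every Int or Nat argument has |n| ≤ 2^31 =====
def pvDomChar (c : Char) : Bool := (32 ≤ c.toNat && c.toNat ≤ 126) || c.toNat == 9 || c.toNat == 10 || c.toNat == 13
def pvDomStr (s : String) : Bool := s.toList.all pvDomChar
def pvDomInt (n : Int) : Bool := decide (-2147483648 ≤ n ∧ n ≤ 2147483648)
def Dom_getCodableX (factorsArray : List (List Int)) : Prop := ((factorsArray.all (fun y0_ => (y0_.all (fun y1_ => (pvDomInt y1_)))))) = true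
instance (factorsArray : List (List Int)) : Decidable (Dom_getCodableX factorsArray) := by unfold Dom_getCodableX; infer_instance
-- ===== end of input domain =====

-- B replaces A's index-dispatching nested loop by pattern matching on the list's shape
-- and a shared bounds-parameterized recursive coder; objective: alternative.

-- ===== PORT A =====
-- constants from the module
def X1max : Int := 40
def X1min : Int := 10
def X2max : Int := 35
def X2min : Int := -15
def X3max : Int := 5
def X3min : Int := -15

-- inner 'for i in factor' body: append the coded value to the list picked by factorNumber
def pvStepA (factorNumber : Int) (st : List Int × List Int × List Int) (i : Int) :
    List Int × List Int × List Int :=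
  if i > 0 then
    if factorNumber == 0 then (st.1 ++ [X1max], st.2.1, st.2.2)
    else if factorNumber == 1 then (st.1, st.2.1 ++ [X2max], st.2.2)
    else (st.1, st.2.1, st.2.2 ++ [X3max])
  else
    if factorNumber == 0 then (st.1 ++ [X1min], st.2.1, st.2.2)
    else if factorNumber == 1 then (st.1, st.2.1 ++ [X2min], st.2.2)
    else (st.1, st.2.1, st.2.2 ++ [X3min])

-- for factorNumber in range(len(factorsArray)): factor = factorsArray[factorNumber]; for i in factor: …
def getCodableX (factorsArray : List (List Int)) : List Int × List Int × List Int :=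
  (PySem.List.enumerate factorsArray 0).foldl
    (fun st p => p.2.foldl (pvStepA p.1) st) ([], [], [])

-- ===== PORT B =====
-- _code(row, lo, hi): structural recursion on the row
def pvCode : List Int → Int → Int → List Int
  | [], _, _ => []
  | v :: vs, lo, hi => (if v > 0 then hi else lo) :: pvCode vs lo hi

-- _tail3(rows): structural recursion flattening the remaining rows with the X3 bounds
def pvTail3 : List (List Int) → List Int
  | [] => []
  | f :: fs => pvCode f X3min X3max ++ pvTail3 fs

def getCodableX_alt (factorsArray : List (List Int)) : List Int × List Int × List Int :=
  match factorsArray with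
  | [] => ([], [], [])
  | [f0] => (pvCode f0 X1min X1max, [], [])
  | f0 :: f1 :: rest => (pvCode f0 X1min X1max, pvCode f1 X2min X2max, pvTail3 rest)

-- ===== PRECONDITION & SPEC =====
def Spec_getCodableX (factorsArray : List (List Int)) (out : List Int × List Int × List Int) : Prop := out = getCodableX_alt factorsArray
instance (factorsArray : List (List Int)) (out : List Int × List Int × List Int) : Decidable (Spec_getCodableX factorsArray out) := by unfold Spec_getCodableX; infer_instance

-- ===== CLAIM (what is proved, stated in full; the proofs are below) =====
def Claim_equal_getCodableX : Prop := ∀ (factorsArray : List (List Int)), Dom_getCodableX factorsArray → Spec_getCodableX factorsArray (getCodableX factorsArray)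

-- ===== LEMMAS AND PROOFS =====

-- A's inner loop at factorNumber 0 appends the X1-coded row to the first component
lemma foldl_stepA_zero (f : List Int) (a b c : List Int) :
    f.foldl (pvStepA 0) (a, b, c) = (a ++ pvCode f X1min X1max, b, c) := by
  induction f generalizing a with
  | nil => simp [pvCode]
  | cons v vs ih =>
    simp only [List.foldl_cons, pvCode, pvStepA,
      show ((0:Int) == 0) = true from rfl, if_true]
    by_cases h : v > 0 <;> simp [h, ih]

-- A's inner loop at factorNumber 1 appends the X2-coded row to the second component
lemma foldl_stepA_one (f : List Int) (a b c : List Int) :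
    f.foldl (pvStepA 1) (a, b, c) = (a, b ++ pvCode f X2min X2max, c) := by
  induction f generalizing b with
  | nil => simp [pvCode]
  | cons v vs ih =>
    simp only [List.foldl_cons, pvCode, pvStepA,
      show ((1:Int) == 0) = false from rfl, show ((1:Int) == 1) = true from rfl,
      if_true, Bool.false_eq_true, if_false]
    by_cases h : v > 0 <;> simp [h, ih]

-- A's inner loop at factorNumber ≥ 2 appends the X3-coded row to the third component
lemma foldl_stepA_ge_two (n : Int) (hn : 2 ≤ n) (f : List Int) (a b c : List Int) :
    f.foldl (pvStepA n) (a, b, c) = (a, b, c ++ pvCode f X3min X3max) := by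
  induction f generalizing c with
  | nil => simp [pvCode]
  | cons v vs ih =>
    have h0 : (n == 0) = false := by simp; omega
    have h1 : (n == 1) = false := by simp; omega
    simp only [List.foldl_cons, pvCode, pvStepA, h0, h1,
      Bool.false_eq_true, if_false]
    by_cases h : v > 0 <;> simp [h, ih]

-- A's outer loop over the tail (enumerate offset n ≥ 2) only builds the third component,
-- and builds exactly pvTail3 of the remaining rows
lemma foldl_enum_ge_two (rest : List (List Int)) (n : Int) (hn : 2 ≤ n)
    (a b c : List Int) :
    (PySem.List.enumerate rest n).foldl (fun st p => p.2.foldl (pvStepA p.1) st) (a, b, c) =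
      (a, b, c ++ pvTail3 rest) := by
  induction rest generalizing n c with
  | nil => simp [PySem.List.enumerate_nil, pvTail3]
  | cons f fs ih =>
    rw [PySem.List.enumerate_cons]
    simp only [List.foldl_cons]
    rw [foldl_stepA_ge_two n hn, ih (n + 1) (by omega)]
    simp [pvTail3]

-- ===== VERDICT (by name: the statement is the Claim_ definition above) =====
theorem getCodableX_spec : Claim_equal_getCodableX := by
  intro fa _
  unfold Spec_getCodableX getCodableX getCodableX_alt
  match fa with
  | [] => simp [PySem.List.enumerate_nil]
  | [f0] =>
    rw [PySem.List.enumerate_cons, PySem.List.enumerate_nil]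
    simp only [List.foldl_cons, List.foldl_nil]
    rw [foldl_stepA_zero]
    simp
  | f0 :: f1 :: rest =>
    rw [PySem.List.enumerate_cons, PySem.List.enumerate_cons]
    simp only [List.foldl_cons]
    norm_num
    rw [foldl_stepA_zero, foldl_stepA_one, foldl_enum_ge_two rest 2 (by omega)]
    simp
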